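-- pv_equiv track=rewrite | github.com/K-Y-k/Coding_Test_Python_SQL | 프로그래머스/Lv0/등수 매기기-정렬, index().py | solution
-- ===== SOURCE A (Python) =====
-- def solution(score):
--     answer = []
--     avg_list = []
--
--     for i in score:                                 # 어차피 순위를 매기는 것이니 평균을 정확히 구할 필요는 없어 더하기만 한 값을 넣고
--         temp_avg = sum(i)
--         avg_list.append(temp_avg)
--
--     avg_list.sort(reverse=True)                     # 평균 리스트를 큰 수부터 내림차순으로 정렬하여
--
--     for i in score:                                 # 기존 점수 리스트의 합과 동일한 평균 리스트의 값의 인덱스를 등수로 넣었다.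
--         answer.append(avg_list.index(sum(i))+1)
--
--
--     return answer
-- ===== SOURCE B (Python) =====
-- def solution(score):
--     sums = [sum(row) for row in score]
--     return [1 + sum(1 for t in sums if t > s) for s in sums]
-- ===== Notes on version B (the rewrite author's own statement) =====
-- stated objective: simpler
-- what changed: Replaces the sort-then-.index lookup with a direct strictly-greater count over the row sums: rank(s) = 1 + #{t : t > s}, no sorting and no positional search.
import Mathlib
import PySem

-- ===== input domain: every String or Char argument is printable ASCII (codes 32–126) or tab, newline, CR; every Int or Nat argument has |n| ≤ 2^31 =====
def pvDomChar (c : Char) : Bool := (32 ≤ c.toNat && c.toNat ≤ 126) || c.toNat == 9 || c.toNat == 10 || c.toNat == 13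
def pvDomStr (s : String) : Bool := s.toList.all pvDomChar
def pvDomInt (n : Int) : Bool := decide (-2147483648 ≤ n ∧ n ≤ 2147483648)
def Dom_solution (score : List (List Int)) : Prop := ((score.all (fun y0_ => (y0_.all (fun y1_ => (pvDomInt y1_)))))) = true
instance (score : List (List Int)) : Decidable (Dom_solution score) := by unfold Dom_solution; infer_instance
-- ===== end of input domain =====

-- B assigns competition ranks by counting strictly greater row sums instead of
-- sorting and locating each sum by position (objective: simpler; same value everywhere).

-- ===== PORT A =====
-- A: build avg_list of row sums, sort it descending, then rank = first index of each sum + 1.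
def solution (score : List (List Int)) : List Int :=
  let avg_list := score.foldl (fun acc i => acc ++ [i.sum]) []
  let avg_sorted := PySem.List.sorted avg_list (fun x => x) true
  -- .index never raises here: each sum occurs in avg_sorted (a permutation of avg_list),
  -- so the `.getD 0` default is unreachable.
  score.foldl (fun answer i =>
    answer ++ [(((PySem.List.index? avg_sorted i.sum).getD 0 : Nat) : Int) + 1]) []

-- ===== PORT B =====
-- B: sums once, rank s = 1 + (count of sums strictly greater than s).
def solution_alt (score : List (List Int)) : List Int :=
  let sums := score.map (fun row => row.sum)
  sums.map (fun s => 1 + (sums.countP (fun t => decide (s < t)) : Int))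

-- ===== PRECONDITION & SPEC =====
def Spec_solution (score : List (List Int)) (out : List Int) : Prop := out = solution_alt score
instance (score : List (List Int)) (out : List Int) : Decidable (Spec_solution score out) := by unfold Spec_solution; infer_instance

-- ===== CLAIM (what is proved, stated in full; the proofs are below) =====
def Claim_equal_solution : Prop := ∀ (score : List (List Int)), Dom_solution score → Spec_solution score (solution score)

-- ===== LEMMAS AND PROOFS =====

-- In a descending-sorted list, the first index of x is the number of elements strictly above x.
theorem index?_desc_eq_count {x : Int} : ∀ (ys : List Int),
    ys.Pairwise (fun a b => b ≤ a) → x ∈ ys →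
    PySem.List.index? ys x = some (ys.countP (fun t => decide (x < t))) := by
  intro ys
  induction ys with
  | nil => intro _ h; simp at h
  | cons y t ih =>
    intro hp hm
    rw [List.pairwise_cons] at hp
    by_cases hxy : y = x
    · subst hxy
      rw [PySem.List.index?_cons_self]
      have hz : t.countP (fun t => decide (y < t)) = 0 := by
        rw [List.countP_eq_zero]
        intro z hz
        simp [not_lt.mpr (hp.1 z hz)]
      simp [hz]
    · have hxt : x ∈ t := by
        rcases List.mem_cons.mp hm with h | h
        · exact absurd h.symm hxy
        · exact h
      have hlt : x < y := lt_of_le_of_ne (hp.1 x hxt) (fun h => hxy h.symm)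
      rw [PySem.List.index?_cons_of_ne t hxy, ih hp.2 hxt]
      simp [hlt]

theorem sum_mem_sorted (sums : List Int) (s : Int) (hs : s ∈ sums) :
    s ∈ PySem.List.sorted sums (fun x => x) true := by
  rw [PySem.List.mem_sorted]; exact hs

-- ===== VERDICT (by name: the statement is the Claim_ definition above) =====
theorem solution_spec : Claim_equal_solution := by
  intro score _
  unfold Spec_solution
  simp only [solution, solution_alt, PySem.List.foldl_append_singleton_eq_map,
    List.nil_append, List.map_map]
  have hperm : (PySem.List.sorted (score.map (fun row => row.sum)) (fun x => x) true).Perm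
      (score.map (fun row => row.sum)) :=
    PySem.List.sorted_perm _ (fun x => x) true
  have hpw : (PySem.List.sorted (score.map (fun row => row.sum)) (fun x => x) true).Pairwise
      (fun a b => b ≤ a) :=
    PySem.List.sorted_pairwise_rev _ (fun x => x)
  apply List.map_congr_left
  intro i hi
  have hmem : i.sum ∈ PySem.List.sorted (score.map (fun row => row.sum)) (fun x => x) true :=
    sum_mem_sorted _ i.sum (List.mem_map_of_mem hi)
  rw [index?_desc_eq_count _ hpw hmem, hperm.countP_eq]
  simp [Int.add_comm]
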